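-- pv_equiv track=rewrite | github.com/VRAXION/VRAXION | v4/research/v22/tests/logic_comparison_test.py | make_comparison_dataset
-- ===== SOURCE A (Python) =====
-- def make_comparison_dataset(N):
--     """Generate all (A, B) pairs with A > B label."""
--     inputs_a, inputs_b, targets = [], [], []
--     for a in range(N):
--         for b in range(N):
--             inputs_a.append(a)
--             inputs_b.append(b)
--             targets.append(1 if a > b else 0)
--     return inputs_a, inputs_b, targets
-- ===== SOURCE B (Python) =====
-- def make_comparison_dataset(N):
--     """Generate all (A, B) pairs with A > B label."""
--     inputs_a, inputs_b, targets = [], [], []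
--     row = list(range(N))
--     for a in row:
--         inputs_a += [a] * N
--         inputs_b += row
--         targets += [1] * a + [0] * (N - a)
--     return inputs_a, inputs_b, targets
-- ===== Notes on version B (the rewrite author's own statement) =====
-- stated objective: alternative
-- what changed: Replaces the nested per-element appending loops with whole-row block construction: each iteration extends the three lists by list repetition ([a]*N, a precomputed row, [1]*a + [0]*(N-a)), so there is no inner per-element loop.
import Mathlib
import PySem

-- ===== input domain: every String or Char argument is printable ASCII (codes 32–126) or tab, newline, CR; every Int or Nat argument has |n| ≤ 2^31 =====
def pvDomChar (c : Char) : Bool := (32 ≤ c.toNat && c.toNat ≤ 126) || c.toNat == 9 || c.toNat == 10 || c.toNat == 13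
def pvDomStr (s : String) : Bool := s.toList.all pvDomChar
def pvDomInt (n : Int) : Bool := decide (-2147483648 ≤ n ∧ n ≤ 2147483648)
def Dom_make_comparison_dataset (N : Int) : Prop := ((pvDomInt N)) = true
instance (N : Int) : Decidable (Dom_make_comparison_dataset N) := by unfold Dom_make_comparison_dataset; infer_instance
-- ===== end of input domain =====

-- B replaces A's nested per-element appending loops with whole-row block construction via list
-- repetition ([a]*N, a shared row, [1]*a + [0]*(N-a)) — a different decomposition, same cost.


-- ===== PORT A =====
def make_comparison_dataset (N : Int) : List Int × List Int × List Int :=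
  (PySem.List.pyRange 0 N 1).foldl
    (fun st a =>
      (PySem.List.pyRange 0 N 1).foldl
        (fun st b => (st.1 ++ [a], st.2.1 ++ [b], st.2.2 ++ [if a > b then (1 : Int) else 0]))
        st)
    ([], [], [])

-- ===== PORT B =====
def make_comparison_dataset_alt (N : Int) : List Int × List Int × List Int :=
  let row := PySem.List.pyRange 0 N 1
  row.foldl
    (fun st a =>
      (st.1 ++ List.replicate N.toNat a,
       st.2.1 ++ row,
       st.2.2 ++ (List.replicate a.toNat (1 : Int) ++ List.replicate (N - a).toNat (0 : Int))))
    ([], [], [])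

-- ===== PRECONDITION & SPEC =====
def Spec_make_comparison_dataset (N : Int) (out : List Int × List Int × List Int) : Prop := out = make_comparison_dataset_alt N
instance (N : Int) (out : List Int × List Int × List Int) : Decidable (Spec_make_comparison_dataset N out) := by unfold Spec_make_comparison_dataset; infer_instance

-- ===== CLAIM (what is proved, stated in full; the proofs are below) =====
def Claim_equal_make_comparison_dataset : Prop := ∀ (N : Int), Dom_make_comparison_dataset N → Spec_make_comparison_dataset N (make_comparison_dataset N)

-- ===== LEMMAS AND PROOFS =====

/-- The inner loop appends one element per iteration to each of the three lists. -/
lemma pv_foldl_triple (l : List Int) (f g h : Int → Int) :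
    ∀ st : List Int × List Int × List Int,
      l.foldl (fun st x => (st.1 ++ [f x], st.2.1 ++ [g x], st.2.2 ++ [h x])) st
        = (st.1 ++ l.map f, st.2.1 ++ l.map g, st.2.2 ++ l.map h) := by
  induction l with
  | nil => intro st; simp
  | cons x xs ih => intro st; simp [List.foldl_cons, ih]

/-- The outer loop appends one block per iteration to each of the three lists. -/
lemma pv_foldl_blocks (l : List Int) (F G H : Int → List Int) :
    ∀ st : List Int × List Int × List Int,
      l.foldl (fun st a => (st.1 ++ F a, st.2.1 ++ G a, st.2.2 ++ H a)) st
        = (st.1 ++ l.flatMap F, st.2.1 ++ l.flatMap G, st.2.2 ++ l.flatMap H) := by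
  induction l with
  | nil => intro st; simp
  | cons x xs ih => intro st; simp [List.foldl_cons, ih]

/-- flatMap respects pointwise equality on members. -/
lemma pv_flatMap_congr {α β : Type} (l : List α) (F G : α → List β)
    (h : ∀ a ∈ l, F a = G a) : l.flatMap F = l.flatMap G := by
  induction l with
  | nil => rfl
  | cons x xs ih =>
    simp only [List.flatMap_cons]
    rw [h x (List.mem_cons_self), ih (fun a ha => h a (List.mem_cons_of_mem _ ha))]

/-- One row of the A-side labels equals the B-side block [1]*a ++ [0]*(N-a). -/
lemma pv_row_targets (N a : Int) (ha0 : 0 ≤ a) (haN : a < N) :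
    (PySem.List.pyRange 0 N 1).map (fun b => if a > b then (1 : Int) else 0)
      = List.replicate a.toNat (1 : Int) ++ List.replicate (N - a).toNat (0 : Int) := by
  rw [PySem.List.pyRange_one_append 0 a N ha0 (le_of_lt haN), List.map_append]
  congr 1
  · have h1 : ∀ b ∈ PySem.List.pyRange 0 a 1,
        (if a > b then (1 : Int) else 0) = 1 := by
      intro b hb
      have := (PySem.List.mem_pyRange_one).1 hb
      simp [show a > b by omega]
    rw [List.map_congr_left h1, List.map_const', PySem.List.length_pyRange_one]
    congr 1
    omega
  · have h0 : ∀ b ∈ PySem.List.pyRange a N 1,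
        (if a > b then (1 : Int) else 0) = 0 := by
      intro b hb
      have := (PySem.List.mem_pyRange_one).1 hb
      simp [show ¬ a > b by omega]
    rw [List.map_congr_left h0, List.map_const', PySem.List.length_pyRange_one]

-- ===== VERDICT (by name: the statement is the Claim_ definition above) =====
theorem make_comparison_dataset_spec : Claim_equal_make_comparison_dataset := by
  intro N _
  show make_comparison_dataset N = make_comparison_dataset_alt N
  unfold make_comparison_dataset make_comparison_dataset_alt
  simp only [pv_foldl_triple, pv_foldl_blocks, List.nil_append]
  refine Prod.ext ?_ (Prod.ext ?_ ?_)
  · refine pv_flatMap_congr _ _ _ ?_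
    intro a ha
    have h := (PySem.List.mem_pyRange_one).1 ha
    rw [List.map_const', PySem.List.length_pyRange_one]
    congr 1
    omega
  · refine pv_flatMap_congr _ _ _ ?_
    intro a _
    exact List.map_id _
  · refine pv_flatMap_congr _ _ _ ?_
    intro a ha
    have h := (PySem.List.mem_pyRange_one).1 ha
    exact pv_row_targets N a h.1 h.2
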